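-- pv_equiv track=rewrite | github.com/nord2sudjp/atcoder | 尺取り法/DSL_3_C_The Number of Windows.py | solve
-- ===== SOURCE A (Python) =====
-- def solve(N,S,A):
--     ans=0
--     for left in range(N):
--         sum=0
--         right=left
--         while right<N and sum+A[right]<=S:
--             sum = sum+A[right]
--             right=right+1
--         ans=ans+right-left
--     return ans
-- ===== SOURCE B (Python) =====
-- def solve(N, S, A):
--     # One left-to-right pass: keep the prefix sums of the still-alive window
--     # starts; each step open a window at r, extend all alive windows by A[r],
--     # drop the ones whose sum exceeds S, and count the survivors.
--     prefix = 0
--     alive = []  # prefix sums P[l] of window starts l whose window still fits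
--     ans = 0
--     for r in range(N):
--         alive.append(prefix)          # window starting at l = r
--         prefix += A[r]
--         alive = [p for p in alive if prefix - p <= S]
--         ans += len(alive)
--     return ans
-- ===== Notes on version B (the rewrite author's own statement) =====
-- stated objective: alternative
-- what changed: Instead of restarting a fresh inner scan for every left index, B makes one left-to-right pass keeping the prefix sums of the still-alive window starts, filtering out starts whose window sum exceeds S and adding the survivor count at each step; correct for negative elements too, unlike a plain two-pointer.
import Mathlib
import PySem

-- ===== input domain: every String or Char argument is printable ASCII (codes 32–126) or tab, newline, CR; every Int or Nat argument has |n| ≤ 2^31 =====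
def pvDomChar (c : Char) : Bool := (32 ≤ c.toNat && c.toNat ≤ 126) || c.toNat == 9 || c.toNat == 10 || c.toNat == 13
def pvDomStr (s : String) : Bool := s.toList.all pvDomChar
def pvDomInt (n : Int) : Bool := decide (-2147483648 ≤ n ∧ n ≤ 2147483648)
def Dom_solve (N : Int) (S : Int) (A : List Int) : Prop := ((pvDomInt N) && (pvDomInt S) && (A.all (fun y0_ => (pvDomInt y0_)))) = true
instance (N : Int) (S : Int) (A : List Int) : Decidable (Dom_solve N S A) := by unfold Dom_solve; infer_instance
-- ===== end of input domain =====

-- B replaces A's per-left rescans by a single left-to-right pass over the array that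
-- maintains the still-alive window starts (objective: alternative algorithm, same worst-case cost).

-- ===== PORT A =====
-- inner 'while right<N and sum+A[right]<=S' loop; fuel = (N - right).toNat, enough
-- because right increases by 1 while right < N.  A[right] is ported as pyGetD: under
-- Pre_solve (N ≤ len A) the index is always in range when the loop body is reached.
def solveWhile (N S : Int) (A : List Int) : Nat → Int → Int → Int
  | 0, _, right => right
  | fuel+1, sum, right =>
      if right < N ∧ sum + PySem.List.pyGetD A right 0 ≤ S then
        solveWhile N S A fuel (sum + PySem.List.pyGetD A right 0) (right + 1)
      else right

def solve (N : Int) (S : Int) (A : List Int) : Int :=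
  (PySem.List.pyRange 0 N 1).foldl
    (fun ans left => ans + solveWhile N S A (N - left).toNat 0 left - left) 0

-- ===== PORT B =====
-- one step of B's pass: state = (prefix, alive, ans)
def stepB (S : Int) (A : List Int) (st : Int × List Int × Int) (r : Int) : Int × List Int × Int :=
  let alive0 := st.2.1 ++ [st.1]
  let pfx := st.1 + PySem.List.pyGetD A r 0
  let alive := alive0.filter (fun p => decide (pfx - p ≤ S))
  (pfx, alive, st.2.2 + (alive.length : Int))

def solve_alt (N : Int) (S : Int) (A : List Int) : Int :=
  ((PySem.List.pyRange 0 N 1).foldl (stepB S A) (0, [], 0)).2.2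

-- ===== PRECONDITION & SPEC =====
-- Pre_solve: exactly the inputs where A's indexing A[right] never leaves the list
-- (for N > len(A) the Python A raises IndexError).
def Pre_solve (N : Int) (S : Int) (A : List Int) : Prop := N ≤ (A.length : Int)
instance (N : Int) (S : Int) (A : List Int) : Decidable (Pre_solve N S A) := by unfold Pre_solve; infer_instance
def pvWitness_solve : Int × Int × List Int := (3, 4, [1, 2, 3])

def Spec_solve (N : Int) (S : Int) (A : List Int) (out : Int) : Prop := out = solve_alt N S A
instance (N : Int) (S : Int) (A : List Int) (out : Int) : Decidable (Spec_solve N S A out) := by unfold Spec_solve; infer_instance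

-- ===== CLAIM (what is proved, stated in full; the proofs are below) =====
def Claim_equal_solve : Prop := ∀ (N : Int) (S : Int) (A : List Int), Dom_solve N S A → Pre_solve N S A → Spec_solve N S A (solve N S A)

-- ===== LEMMAS AND PROOFS =====

-- prefix sums
def pref (A : List Int) (k : Nat) : Int := (A.take k).sum

-- "the window starting at l still fits through position t": all partial sums ≤ S
def goodb (S : Int) (A : List Int) (l t : Nat) : Bool :=
  (List.range (t - l)).all (fun i => decide (pref A (l + i + 1) - pref A l ≤ S))

theorem pref_succ (A : List Int) (k : Nat) (h : k < A.length) :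
    pref A (k + 1) = pref A k + A[k] := by
  simpa [pref] using List.sum_take_succ A k h

theorem good_self (S : Int) (A : List Int) (l : Nat) : goodb S A l l = true := by
  simp [goodb]

theorem good_succ (S : Int) (A : List Int) (l t : Nat) (h : l ≤ t) :
    goodb S A l (t+1) = (goodb S A l t && decide (pref A (t+1) - pref A l ≤ S)) := by
  have h1 : t + 1 - l = (t - l) + 1 := by omega
  have h2 : l + (t - l) + 1 = t + 1 := by omega
  simp [goodb, h1, List.range_succ, h2]

theorem good_spec (S : Int) (A : List Int) (l t : Nat) :
    goodb S A l t = true ↔ ∀ j, l < j → j ≤ t → pref A j - pref A l ≤ S := by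
  simp only [goodb, List.all_eq_true, List.mem_range, decide_eq_true_eq]
  constructor
  · intro h j hj1 hj2
    have := h (j - l - 1) (by omega)
    have he : l + (j - l - 1) + 1 = j := by omega
    rwa [he] at this
  · intro h i hi
    exact h (l + i + 1) (by omega) (by omega)

-- the per-left count defined from goodb (A's inner-loop result, B's survivor multiplicity)
def cnt (S : Int) (A : List Int) (n r l : Nat) : Nat :=
  ((Finset.range n).filter (fun t => r ≤ t ∧ goodb S A l (t+1) = true)).card

theorem whileA (S : Int) (A : List Int) (n : Nat) (hn : n ≤ A.length) (l : Nat)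
    (fuel r : Nat) (hlr : l ≤ r) (hrn : r ≤ n) (hf : n - r ≤ fuel)
    (hg : goodb S A l r = true) :
    solveWhile (n : Int) S A fuel (pref A r - pref A l) (r : Int)
      = ((r + cnt S A n r l : Nat) : Int) := by
  induction fuel generalizing r with
  | zero =>
    have hr : r = n := by omega
    have hc0 : cnt S A n r l = 0 := by
      rw [cnt, Finset.card_eq_zero, Finset.filter_eq_empty_iff]
      intro t ht
      simp only [Finset.mem_range] at ht
      rintro ⟨h1, -⟩
      omega
    simp [solveWhile, hc0]
  | succ fuel ih =>
    by_cases hrn' : r < n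
    · have hget : PySem.List.pyGetD A (r : Int) 0 = A[r] := by
        rw [PySem.List.pyGetD_natCast]
        exact List.getD_eq_getElem A 0 (by omega)
      have hps : pref A (r+1) = pref A r + A[r] := pref_succ A r (by omega)
      by_cases hc : pref A (r+1) - pref A l ≤ S
      · have hcond : ((r : Int) < (n : Int) ∧ pref A r - pref A l + PySem.List.pyGetD A (r : Int) 0 ≤ S) := by
          refine ⟨by exact_mod_cast hrn', ?_⟩
          rw [hget]
          have : pref A r - pref A l + A[r] = pref A (r+1) - pref A l := by rw [hps]; ring
          rw [this]; exact hc
        rw [solveWhile, if_pos hcond]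
        have harg : pref A r - pref A l + PySem.List.pyGetD A (r : Int) 0 = pref A (r+1) - pref A l := by
          rw [hget, hps]; ring
        have hcast : ((r : Int) + 1) = (((r+1 : Nat)) : Int) := by push_cast; ring
        have hg' : goodb S A l (r+1) = true := by
          rw [good_succ S A l r hlr]
          simp [hg, hc]
        rw [harg, hcast, ih (r+1) (by omega) (by omega) (by omega) hg']
        have hins : (Finset.range n).filter (fun t => r ≤ t ∧ goodb S A l (t+1) = true)
            = insert r ((Finset.range n).filter (fun t => r+1 ≤ t ∧ goodb S A l (t+1) = true)) := by
          ext t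
          simp only [Finset.mem_filter, Finset.mem_insert, Finset.mem_range]
          constructor
          · rintro ⟨ht, hrt, hgt⟩
            by_cases hteq : t = r
            · exact Or.inl hteq
            · exact Or.inr ⟨ht, by omega, hgt⟩
          · rintro (hteq | ⟨ht, hrt, hgt⟩)
            · exact ⟨by omega, by omega, by rw [hteq]; exact hg'⟩
            · exact ⟨ht, by omega, hgt⟩
        have hcnt : cnt S A n r l = cnt S A n (r+1) l + 1 := by
          rw [cnt, hins, Finset.card_insert_of_notMem (by simp), cnt]
        rw [hcnt]
        push_cast
        ring
      · have hcond : ¬ ((r : Int) < (n : Int) ∧ pref A r - pref A l + PySem.List.pyGetD A (r : Int) 0 ≤ S) := by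
          rintro ⟨-, hsum⟩
          rw [hget] at hsum
          have : pref A r - pref A l + A[r] = pref A (r+1) - pref A l := by rw [hps]; ring
          rw [this] at hsum
          exact hc hsum
        rw [solveWhile, if_neg hcond]
        have hc0 : cnt S A n r l = 0 := by
          rw [cnt, Finset.card_eq_zero, Finset.filter_eq_empty_iff]
          intro t ht
          simp only [Finset.mem_range] at ht
          rintro ⟨hrt, hgt⟩
          exact hc ((good_spec S A l (t+1)).mp hgt (r+1) (by omega) (by omega))
        simp [hc0]
    · have hr : r = n := by omega
      have hcond : ¬ ((r : Int) < (n : Int) ∧ pref A r - pref A l + PySem.List.pyGetD A (r : Int) 0 ≤ S) := by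
        rintro ⟨hlt, -⟩
        have : r < n := by exact_mod_cast hlt
        omega
      rw [solveWhile, if_neg hcond]
      have hc0 : cnt S A n r l = 0 := by
        rw [cnt, Finset.card_eq_zero, Finset.filter_eq_empty_iff]
        intro t ht
        simp only [Finset.mem_range] at ht
        rintro ⟨h1, -⟩
        omega
      simp [hc0]

-- alive list after t steps of B's pass
def aliveL (S : Int) (A : List Int) (t : Nat) : List Int :=
  ((List.range t).filter (fun l => goodb S A l t)).map (pref A)

theorem alive_step (S : Int) (A : List Int) (t : Nat) :
    (aliveL S A t ++ [pref A t]).filter (fun p => decide (pref A (t+1) - p ≤ S))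
      = aliveL S A (t+1) := by
  have h1 : aliveL S A t ++ [pref A t]
      = ((List.range (t+1)).filter (fun l => goodb S A l t)).map (pref A) := by
    rw [List.range_succ, List.filter_append, List.map_append]
    simp [aliveL, good_self]
  rw [h1, List.filter_map, List.filter_filter]
  unfold aliveL
  congr 1
  apply List.filter_congr
  intro l hl
  simp only [List.mem_range] at hl
  rw [good_succ S A l t (by omega)]
  simp [Bool.and_comm]

theorem foldB_inv (S : Int) (A : List Int) (n : Nat) (hn : n ≤ A.length) (t : Nat) (ht : t ≤ n) :
    ((List.range t).map Int.ofNat).foldl (stepB S A) (0, [], 0)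
      = (pref A t, aliveL S A t,
         ((List.range t).map (fun u => ((aliveL S A (u+1)).length : Int))).sum) := by
  induction t with
  | zero => simp [pref, aliveL]
  | succ t ih =>
    have ht' : t ≤ n := by omega
    rw [List.range_succ, List.map_append, List.foldl_append, ih ht']
    have hpfx : pref A t + PySem.List.pyGetD A (t : Int) 0 = pref A (t+1) := by
      rw [PySem.List.pyGetD_natCast, List.getD_eq_getElem A 0 (by omega), pref_succ A t (by omega)]
    simp only [List.map_cons, List.map_nil, List.foldl_cons, List.foldl_nil, stepB,
      Int.ofNat_eq_natCast, hpfx, alive_step]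
    simp

theorem foldl_body (f : Int → Int) (xs : List Int) (a : Int) :
    xs.foldl (fun acc x => acc + f x - x) a = a + (xs.map (fun x => f x - x)).sum := by
  induction xs generalizing a with
  | nil => simp
  | cons x xs ih => rw [List.foldl_cons, ih]; simp; ring

theorem sum_map_range (g : Nat → Int) (n : Nat) :
    ((List.range n).map g).sum = ∑ i ∈ Finset.range n, g i := by
  induction n with
  | zero => simp
  | succ n ih =>
    rw [List.range_succ, List.map_append, List.sum_append, Finset.sum_range_succ, ih]
    simp

theorem len_card (p : Nat → Bool) (v : Nat) :
    ((List.range v).filter p).length = ((Finset.range v).filter (fun x => p x = true)).card := by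
  induction v with
  | zero => simp
  | succ v ih =>
    rw [List.range_succ, List.filter_append, List.length_append, ih, Finset.range_add_one,
      Finset.filter_insert]
    by_cases hp : p v = true
    · rw [if_pos hp, Finset.card_insert_of_notMem (by simp)]
      simp [hp]
    · rw [if_neg hp]
      simp [hp]

theorem solve_spec : Claim_equal_solve := by
  intro N S A _hdom hpre
  unfold Spec_solve
  by_cases hN : 0 ≤ N
  · have hNn : ((N.toNat : Int)) = N := Int.toNat_of_nonneg hN
    set n := N.toNat with hdefn
    have hpre' : N ≤ (A.length : Int) := hpre
    have hlen : n ≤ A.length := by omega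
    have hrange : PySem.List.pyRange 0 N 1 = (List.range n).map Int.ofNat := by
      rw [PySem.List.pyRange_one]
      simp only [sub_zero, hdefn]
      exact List.map_congr_left (fun k _ => by simp)
    have hB : solve_alt N S A
        = ((List.range n).map (fun u => ((aliveL S A (u+1)).length : Int))).sum := by
      simp only [solve_alt]
      rw [hrange, foldB_inv S A n hlen n le_rfl]
    have hA : solve N S A
        = ((List.range n).map (fun l => (cnt S A n l l : Int))).sum := by
      simp only [solve]
      rw [hrange, ← hNn,
        foldl_body (fun left => solveWhile (n : Int) S A ((n : Int) - left).toNat 0 left),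
        List.map_map, zero_add]
      congr 1
      apply List.map_congr_left
      intro l hl
      simp only [List.mem_range] at hl
      simp only [Function.comp_apply, Int.ofNat_eq_natCast]
      have hfuel : n - l ≤ ((n : Int) - (l : Int)).toNat := by omega
      have hw := whileA S A n hlen l (((n : Int) - (l : Int)).toNat) l le_rfl
        (le_of_lt hl) hfuel (good_self S A l)
      rw [sub_self] at hw
      rw [hw]
      push_cast
      ring
    rw [hA, hB, sum_map_range, sum_map_range, ← Nat.cast_sum, ← Nat.cast_sum]
    congr 1
    have hlen2 : ∀ u ∈ Finset.range n, (aliveL S A (u+1)).length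
        = ((Finset.range n).filter (fun l => l ≤ u ∧ goodb S A l (u+1) = true)).card := by
      intro u hu
      simp only [Finset.mem_range] at hu
      rw [aliveL, List.length_map, len_card]
      congr 1
      ext l
      simp only [Finset.mem_filter, Finset.mem_range]
      constructor
      · rintro ⟨hl, hg⟩
        exact ⟨by omega, by omega, hg⟩
      · rintro ⟨hl, hlu, hg⟩
        exact ⟨by omega, hg⟩
    rw [Finset.sum_congr rfl hlen2]
    simp only [cnt, Finset.card_filter]
    rw [Finset.sum_comm]
  · have hneg : N ≤ 0 := by omega
    simp only [solve, solve_alt]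
    rw [PySem.List.pyRange_one_eq_nil hneg]
    simp
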